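-- pv_equiv track=rewrite | github.com/ismethfzoglu/hash-Security | hashSecurity.py | pass_shuff
-- ===== SOURCE A (Python) =====
-- def pass_shuff(psw):
--     length = len(psw)
--     if length <= 1:
--         return psw
--
--     mid = length // 2
--     left = mid - 1
--     right = length-1
--
--     shuffled_psw = []
--
--     for i in range(length):
--         if i % 2 == 0:
--             if left >= 0:
--                 shuffled_psw.append(psw[left])
--                 left -= 1
--             else:
--                 shuffled_psw.append(psw[right])
--                 right -= 1
--         else:
--             if right != left:
--                 shuffled_psw.append(psw[right])
--                 right -= 1
--             else:
--                 shuffled_psw.append(psw[left])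
--                 left -= 1
--
--     return ''.join(shuffled_psw)
-- ===== SOURCE B (Python) =====
-- def pass_shuff(psw):
--     if len(psw) <= 1:
--         return psw
--     mid = len(psw) // 2
--     left = psw[:mid][::-1]
--     right = psw[mid:][::-1]
--     out = []
--     for i in range(len(right)):
--         if i < len(left):
--             out.append(left[i])
--         out.append(right[i])
--     return ''.join(out)
-- ===== Notes on version B (the rewrite author's own statement) =====
-- stated objective: simpler
-- what changed: B replaces A's stateful two-cursor walk with parity and exhaustion branches by precomputing the two reversed halves up front and interleaving them in one plain loop.
import Mathlib
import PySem

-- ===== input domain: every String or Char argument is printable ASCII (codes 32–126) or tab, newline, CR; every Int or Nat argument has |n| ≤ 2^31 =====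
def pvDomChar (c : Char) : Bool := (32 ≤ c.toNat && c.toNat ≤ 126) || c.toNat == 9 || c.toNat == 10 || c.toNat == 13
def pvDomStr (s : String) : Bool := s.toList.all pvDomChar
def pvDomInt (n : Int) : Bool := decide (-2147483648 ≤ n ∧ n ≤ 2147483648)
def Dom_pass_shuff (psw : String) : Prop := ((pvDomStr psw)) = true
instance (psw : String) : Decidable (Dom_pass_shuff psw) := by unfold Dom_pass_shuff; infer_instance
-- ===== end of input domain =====

-- B precomputes the two reversed halves and interleaves them in one simple loop,
-- instead of A's stateful two-cursor walk with parity branches (objective: simpler).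

-- ===== PORT A =====
-- loop body of A: state (left, right, shuffled_psw); indices stay Python ints.
-- psw[left]/psw[right] via pyGetD: every index A's loop reads is in range, so the default is never used.
def passStepA (cs : List Char) (st : Int × Int × List Char) (i : Int) : Int × Int × List Char :=
  let (left, right, acc) := st
  if PySem.Int.mod i 2 = 0 then
    if left ≥ 0 then (left - 1, right, acc ++ [PySem.List.pyGetD cs left ' '])
    else (left, right - 1, acc ++ [PySem.List.pyGetD cs right ' '])
  else
    if right ≠ left then (left, right - 1, acc ++ [PySem.List.pyGetD cs right ' '])
    else (left - 1, right, acc ++ [PySem.List.pyGetD cs left ' '])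

def pass_shuff (psw : String) : String :=
  let cs := psw.toList
  let length : Int := PySem.List.len cs
  if length ≤ 1 then psw
  else
    let mid := PySem.Int.floordiv length 2
    let res := (PySem.List.pyRange 0 length 1).foldl (passStepA cs) (mid - 1, length - 1, ([] : List Char))
    String.mk res.2.2

-- ===== PORT B =====
def pass_shuff_alt (psw : String) : String :=
  let cs := psw.toList
  if cs.length ≤ 1 then psw
  else
    let mid := cs.length / 2
    let left := (cs.take mid).reverse          -- psw[:mid][::-1]
    let right := (cs.drop mid).reverse         -- psw[mid:][::-1]
    let out := (List.range right.length).foldl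
      (fun acc i => (if i < left.length then acc ++ [left.getD i ' '] else acc) ++ [right.getD i ' ']) []
    String.mk out

-- ===== PRECONDITION & SPEC =====
def Spec_pass_shuff (psw : String) (out : String) : Prop := out = pass_shuff_alt psw
instance (psw : String) (out : String) : Decidable (Spec_pass_shuff psw out) := by unfold Spec_pass_shuff; infer_instance

-- ===== CLAIM (what is proved, stated in full; the proofs are below) =====
def Claim_equal_pass_shuff : Prop := ∀ (psw : String), Dom_pass_shuff psw → Spec_pass_shuff psw (pass_shuff psw)

-- ===== LEMMAS AND PROOFS =====

-- the characters emitted by k (even,odd) pairs of loop steps: cs[left], cs[right], cs[left-1], cs[right-1], …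
def pairsOut (cs : List Char) : Int → Int → Nat → List Char
  | _, _, 0 => []
  | left, right, Nat.succ k =>
      PySem.List.pyGetD cs left ' ' :: PySem.List.pyGetD cs right ' ' :: pairsOut cs (left - 1) (right - 1) k

lemma pairsOut_snoc (cs : List Char) :
    ∀ (k : Nat) (left right : Int),
    pairsOut cs left right (k + 1)
      = pairsOut cs left right k
          ++ [PySem.List.pyGetD cs (left - k) ' ', PySem.List.pyGetD cs (right - k) ' '] := by
  intro k
  induction k with
  | zero => intro left right; simp [pairsOut]
  | succ k ih =>
    intro left right
    have h1 : (left - 1 - (k : Int)) = left - ((k : Nat) + 1 : Nat) := by push_cast; ring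
    have h2 : (right - 1 - (k : Int)) = right - ((k : Nat) + 1 : Nat) := by push_cast; ring
    calc pairsOut cs left right (k + 2)
        = PySem.List.pyGetD cs left ' ' :: PySem.List.pyGetD cs right ' '
            :: pairsOut cs (left - 1) (right - 1) (k + 1) := rfl
      _ = _ := by rw [ih]; simp [pairsOut, h1, h2]

-- A's loop, run for k full (even,odd) pairs starting at an even index i0:
-- it emits pairsOut cs left right k and moves both cursors down by k.
lemma loopA_pairs (cs : List Char) :
    ∀ (k : Nat) (left right i0 : Int) (acc : List Char) (rest : List Int),
    i0 % 2 = 0 → (k : Int) ≤ left + 1 → left ≤ right →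
    ((PySem.List.pyRange i0 (i0 + 2*k) 1) ++ rest).foldl (passStepA cs) (left, right, acc)
      = rest.foldl (passStepA cs) (left - k, right - k, acc ++ pairsOut cs left right k) := by
  intro k
  induction k with
  | zero =>
    intro left right i0 acc rest _ _ _
    rw [PySem.List.pyRange_one_eq_nil (by push_cast; omega)]
    simp [pairsOut]
  | succ k ih =>
    intro left right i0 acc rest h0 hk hlr
    have hleft : 0 ≤ left := by push_cast at hk; omega
    rw [PySem.List.pyRange_one_cons (by push_cast; omega : i0 < i0 + 2*(k+1:Nat))]
    rw [PySem.List.pyRange_one_cons (by push_cast; omega : i0 + 1 < i0 + 2*(k+1:Nat))]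
    simp only [List.cons_append, List.foldl_cons]
    have hd0 : (2:Int) ∣ i0 := by omega
    have hd1 : ¬ (2:Int) ∣ (i0 + 1) := by omega
    have s1 : passStepA cs (left, right, acc) i0
        = (left - 1, right, acc ++ [PySem.List.pyGetD cs left ' ']) := by
      simp [passStepA, hd0, hleft]
    have s2 : passStepA cs (left - 1, right, acc ++ [PySem.List.pyGetD cs left ' ']) (i0 + 1)
        = (left - 1, right - 1,
            acc ++ [PySem.List.pyGetD cs left ' ', PySem.List.pyGetD cs right ' ']) := by
      simp [passStepA, hd1]
      omega
    rw [s1, s2]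
    have hrange : (PySem.List.pyRange (i0 + 1 + 1) (i0 + 2*(k+1:Nat)) 1)
        = PySem.List.pyRange (i0 + 2) (i0 + 2 + 2*k) 1 := by
      congr 1 <;> push_cast <;> ring
    rw [hrange,
      ih (left - 1) (right - 1) (i0 + 2)
        (acc ++ [PySem.List.pyGetD cs left ' ', PySem.List.pyGetD cs right ' ']) rest
        (by omega) (by push_cast at hk ⊢; omega) (by omega)]
    have hst : ((left - 1 - (k:Int)), (right - 1 - (k:Int)),
          (acc ++ [PySem.List.pyGetD cs left ' ', PySem.List.pyGetD cs right ' '])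
            ++ pairsOut cs (left - 1) (right - 1) k)
        = ((left - ((k:Nat)+1:Nat) : Int), (right - ((k:Nat)+1:Nat) : Int),
            acc ++ pairsOut cs left right (k+1)) := by
      simp only [Prod.mk.injEq]
      refine ⟨by push_cast; ring, by push_cast; ring, ?_⟩
      simp [pairsOut]
    rw [hst]

-- B's loop emits, per index i, the optional left char then the right char.
lemma loopB_flat (L R : List Char) :
    ∀ (idx : List Nat) (acc : List Char),
    idx.foldl (fun acc i => (if i < L.length then acc ++ [L.getD i ' '] else acc) ++ [R.getD i ' ']) acc
      = acc ++ idx.flatMap (fun i => (if i < L.length then [L.getD i ' '] else []) ++ [R.getD i ' ']) := by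
  intro idx
  induction idx with
  | nil => intro acc; simp
  | cons i idx ih =>
    intro acc
    simp only [List.foldl_cons, List.flatMap_cons, ih]
    split_ifs <;> simp

-- a flatMap over range whose body is the pair at descending indices IS pairsOut
lemma flatMap_pairs (cs : List Char) (g : Nat → List Char) (left right : Int) :
    ∀ (k : Nat),
    (∀ j, j < k → g j = [PySem.List.pyGetD cs (left - j) ' ', PySem.List.pyGetD cs (right - j) ' ']) →
    (List.range k).flatMap g = pairsOut cs left right k := by
  intro k
  induction k with
  | zero => intro _; simp [pairsOut]
  | succ k ih =>
    intro hg
    rw [List.range_succ, List.flatMap_append, ih (fun j hj => hg j (by omega)), pairsOut_snoc]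
    simp only [List.flatMap_cons, List.flatMap_nil, List.append_nil]
    rw [hg k (by omega)]

lemma getD_rev_take (cs : List Char) (m j : Nat) (hj : j < m) (hm : m ≤ cs.length) :
    ((cs.take m).reverse).getD j ' ' = cs.getD (m - 1 - j) ' ' := by
  have hlen : (cs.take m).reverse.length = m := by
    rw [List.length_reverse, List.length_take]; omega
  rw [List.getD_eq_getElem _ _ (by omega), List.getD_eq_getElem _ _ (by omega)]
  rw [List.getElem_reverse, List.getElem_take]
  congr 1
  rw [List.length_take]; omega

lemma getD_rev_drop (cs : List Char) (m j : Nat) (hm : m ≤ cs.length) (hj : j < cs.length - m) :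
    ((cs.drop m).reverse).getD j ' ' = cs.getD (cs.length - 1 - j) ' ' := by
  have hlen : (cs.drop m).reverse.length = cs.length - m := by
    rw [List.length_reverse, List.length_drop]
  rw [List.getD_eq_getElem _ _ (by omega), List.getD_eq_getElem _ _ (by omega)]
  rw [List.getElem_reverse, List.getElem_drop]
  congr 1
  rw [List.length_drop]; omega

-- the core equality of the two ports on strings of length ≥ 2
lemma core_eq (cs : List Char) (mid : Nat) (h2 : 2 ≤ cs.length) (hmid : mid = cs.length / 2) :
    (List.foldl (passStepA cs) ((mid : Int) - 1, (cs.length : Int) - 1, ([] : List Char))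
        (PySem.List.pyRange 0 (cs.length : Int) 1)).2.2
    = (List.range ((cs.drop mid).reverse.length)).foldl
        (fun acc i => (if i < ((cs.take mid).reverse).length then acc ++ [((cs.take mid).reverse).getD i ' '] else acc)
          ++ [((cs.drop mid).reverse).getD i ' ']) [] := by
  have hRlen : ((cs.drop mid).reverse).length = cs.length - mid := by
    rw [List.length_reverse, List.length_drop]
  have hLlen : ((cs.take mid).reverse).length = mid := by
    rw [List.length_reverse, List.length_take]; omega
  rw [loopB_flat ((cs.take mid).reverse) ((cs.drop mid).reverse), hRlen]
  have hg : ∀ j, j < mid →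
      ((if j < ((cs.take mid).reverse).length then [((cs.take mid).reverse).getD j ' '] else [])
        ++ [((cs.drop mid).reverse).getD j ' '])
      = [PySem.List.pyGetD cs ((mid : Int) - 1 - j) ' ', PySem.List.pyGetD cs ((cs.length : Int) - 1 - j) ' '] := by
    intro j hj
    rw [hLlen, if_pos hj, getD_rev_take cs mid j hj (by omega),
      getD_rev_drop cs mid j (by omega) (by omega)]
    have e1 : ((mid : Int) - 1 - j) = ((mid - 1 - j : Nat) : Int) := by push_cast; omega
    have e2 : ((cs.length : Int) - 1 - j) = ((cs.length - 1 - j : Nat) : Int) := by push_cast; omega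
    rw [e1, e2, PySem.List.pyGetD_natCast, PySem.List.pyGetD_natCast]
    rfl
  rcases (by omega : cs.length = 2 * mid ∨ cs.length = 2 * mid + 1) with he | ho
  · -- even length: exactly mid pairs
    have hsplit : PySem.List.pyRange 0 (cs.length : Int) 1
        = PySem.List.pyRange 0 (0 + 2 * (mid : Nat)) 1 := by
      congr 1; push_cast; omega
    rw [hsplit, ← List.append_nil (PySem.List.pyRange 0 (0 + 2 * (mid : Nat)) 1),
      loopA_pairs cs mid ((mid : Int) - 1) ((cs.length : Int) - 1) 0 [] [] (by decide)
        (by push_cast; omega) (by push_cast; omega)]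
    have hr : cs.length - mid = mid := by omega
    rw [hr, flatMap_pairs cs _ ((mid : Int) - 1) ((cs.length : Int) - 1) mid hg]
    simp
  · -- odd length: mid pairs, then one left-exhausted step that takes cs[mid]
    have hsplit : PySem.List.pyRange 0 (cs.length : Int) 1
        = PySem.List.pyRange 0 (0 + 2 * (mid : Nat)) 1 ++ [(0 + 2 * (mid : Nat) : Int)] := by
      rw [PySem.List.pyRange_one_append 0 (0 + 2 * (mid : Nat)) (cs.length : Int)
          (by push_cast; omega) (by push_cast; omega)]
      congr 1
      have hcl : (cs.length : Int) = (0 + 2 * (mid : Nat) : Int) + 1 := by push_cast; omega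
      rw [hcl, PySem.List.pyRange_one_singleton]
    rw [hsplit,
      loopA_pairs cs mid ((mid : Int) - 1) ((cs.length : Int) - 1) 0 [] _ (by decide)
        (by push_cast; omega) (by push_cast; omega)]
    have eL : ((mid : Int) - 1 - (mid : Nat)) = -1 := by push_cast; ring
    have eR : ((cs.length : Int) - 1 - (mid : Nat)) = (mid : Int) := by push_cast; omega
    rw [eL, eR]
    have hd : (2:Int) ∣ (0 + 2 * (mid : Nat) : Int) := ⟨(mid : Int), by ring⟩
    have hstep : passStepA cs (-1, (mid : Int),
          [] ++ pairsOut cs ((mid : Int) - 1) ((cs.length : Int) - 1) mid) (0 + 2 * (mid : Nat) : Int)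
        = (-1, (mid : Int) - 1,
          ([] ++ pairsOut cs ((mid : Int) - 1) ((cs.length : Int) - 1) mid)
            ++ [PySem.List.pyGetD cs (mid : Int) ' ']) := by
      simp [passStepA]
    simp only [List.foldl_cons, List.foldl_nil]
    rw [hstep]
    have hr : cs.length - mid = mid + 1 := by omega
    rw [hr, List.range_succ, List.flatMap_append,
      flatMap_pairs cs _ ((mid : Int) - 1) ((cs.length : Int) - 1) mid hg]
    have hlast : List.flatMap
          (fun i => (if i < ((cs.take mid).reverse).length then [((cs.take mid).reverse).getD i ' '] else [])
            ++ [((cs.drop mid).reverse).getD i ' ']) [mid]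
        = [PySem.List.pyGetD cs (mid : Int) ' '] := by
      simp only [List.flatMap_cons, List.flatMap_nil, List.append_nil]
      rw [hLlen, if_neg (by omega), getD_rev_drop cs mid mid (by omega) (by omega)]
      have e : ((mid : Int)) = ((cs.length - 1 - mid : Nat) : Int) := by push_cast; omega
      rw [e, PySem.List.pyGetD_natCast]
      simp
    rw [hlast]
    simp

lemma ports_eq (psw : String) : pass_shuff psw = pass_shuff_alt psw := by
  unfold pass_shuff pass_shuff_alt
  simp only [PySem.List.len_eq]
  by_cases h1 : psw.toList.length ≤ 1
  · rw [if_pos (by exact_mod_cast h1), if_pos h1]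
  · rw [if_neg (by exact_mod_cast h1), if_neg h1]
    have hfd : PySem.Int.floordiv (psw.toList.length : Int) 2 = ((psw.toList.length / 2 : Nat) : Int) := by
      exact_mod_cast PySem.Int.floordiv_natCast psw.toList.length 2
    rw [hfd]
    exact congrArg String.mk (core_eq psw.toList (psw.toList.length / 2) (by omega) rfl)

-- ===== VERDICT (by name: the statement is the Claim_ definition above) =====
theorem pass_shuff_spec : Claim_equal_pass_shuff := by
  intro psw _
  unfold Spec_pass_shuff
  exact ports_eq psw
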